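-- pv_equiv track=rewrite | github.com/Chekinm/Code-wars | Problems-from-web/legth_of_the_longest_subset.py | lenght_of_longest_subset1
-- ===== SOURCE A (Python) =====
-- from typing import Iterable
--
-- def lenght_of_longest_subset1(input_objects: Iterable, k: int) -> int:
--     """return the length of the subset of input_objects  which contain maximum
--     k different object"""
--     length = 0
--     right_most_indexes = {}
--     index_left = -1
--
--     for index, obj in enumerate(input_objects):
--         right_most_indexes[obj] = index
--         if len(right_most_indexes) <= k:
--             length = max(length, index - index_left)
--         else:
--             elem_to_delete = min(right_most_indexes,
--                                  key=right_most_indexes.get)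
--             index_left = right_most_indexes[elem_to_delete]
--             right_most_indexes.pop(elem_to_delete)
--     return length
-- ===== SOURCE B (Python) =====
-- def lenght_of_longest_subset1(input_objects, k):
--     """return the length of the subset of input_objects  which contain maximum
--     k different object"""
--     objs = list(input_objects)
--     if k <= 0:
--         return 0
--     counts = {}
--     left = 0
--     best = 0
--     for right, obj in enumerate(objs):
--         counts[obj] = counts.get(obj, 0) + 1
--         while len(counts) > k:
--             lo = objs[left]
--             counts[lo] -= 1
--             if counts[lo] == 0:
--                 del counts[lo]
--             left += 1
--         best = max(best, right - left + 1)
--     return best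
-- ===== Notes on version B (the rewrite author's own statement) =====
-- stated objective: faster
-- what changed: Replaced the rightmost-index dict with a min-scan over all keys on every overflow by a two-pointer sliding window that keeps a count dict and shrinks the left edge, removing the O(k) inner min scan.
import Mathlib
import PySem

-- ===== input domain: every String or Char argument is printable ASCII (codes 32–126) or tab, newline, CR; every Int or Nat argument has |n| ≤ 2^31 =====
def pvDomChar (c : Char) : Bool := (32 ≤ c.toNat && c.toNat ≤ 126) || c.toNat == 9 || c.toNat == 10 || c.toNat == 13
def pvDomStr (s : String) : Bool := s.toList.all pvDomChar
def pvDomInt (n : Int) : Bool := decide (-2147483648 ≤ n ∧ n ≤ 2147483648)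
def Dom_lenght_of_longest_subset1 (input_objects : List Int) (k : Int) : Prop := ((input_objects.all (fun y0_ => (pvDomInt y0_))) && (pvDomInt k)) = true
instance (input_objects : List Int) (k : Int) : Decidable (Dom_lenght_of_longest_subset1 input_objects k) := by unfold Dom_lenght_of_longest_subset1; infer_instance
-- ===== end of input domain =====

-- B replaces A's per-overflow min-scan over the rightmost-index dict by a two-pointer
-- sliding window with a count dict (objective: faster, O(n) instead of O(n*k)).


-- ===== PORT A =====
-- loop body of A's for-loop: state = (length, right_most_indexes, index_left)
def pvStepA (k : Int) (s : Int × PySem.Dict Int Int × Int) (p : Int × Int) :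
    Int × PySem.Dict Int Int × Int :=
  let r := s.2.1.insert p.2 p.1
  if (r.size : Int) ≤ k then (max s.1 (p.1 - s.2.2), r, s.2.2)
  else
    match PySem.List.min? r.keys (fun e => r.getD e 0) with
    | some e => (s.1, r.erase e, r.getD e 0)
    | none => (s.1, r, s.2.2)   -- unreachable: the dict is nonempty

def lenght_of_longest_subset1 (input_objects : List Int) (k : Int) : Int :=
  ((PySem.List.enumerate input_objects 0).foldl (pvStepA k)
    (0, PySem.Dict.empty, -1)).1

-- ===== PORT B =====
-- B's inner while-loop: state = (counts, left); fuel bounds the iterations (≤ len(objs))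
def pvShrinkB (objs : List Int) (k : Int) :
    Nat → PySem.Dict Int Int × Int → PySem.Dict Int Int × Int
  | 0, st => st
  | fuel + 1, st =>
    if (st.1.size : Int) > k then
      match PySem.List.pyGet? objs st.2 with
      | none => st   -- unreachable (Python would raise IndexError)
      | some lo =>
        let c := st.1.modify lo 0 (· - 1)
        if c.getD lo 0 == 0 then pvShrinkB objs k fuel (c.erase lo, st.2 + 1)
        else pvShrinkB objs k fuel (c, st.2 + 1)
    else st

-- loop body of B's for-loop: state = (counts, left, best)
def pvStepB (objs : List Int) (k : Int) (s : PySem.Dict Int Int × Int × Int)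
    (p : Int × Int) : PySem.Dict Int Int × Int × Int :=
  let c := s.1.modify p.2 0 (· + 1)
  let cl := pvShrinkB objs k objs.length (c, s.2.1)
  (cl.1, cl.2, max s.2.2 (p.1 - cl.2 + 1))

def lenght_of_longest_subset1_alt (input_objects : List Int) (k : Int) : Int :=
  if k ≤ 0 then 0
  else
    ((PySem.List.enumerate input_objects 0).foldl
      (pvStepB input_objects k) (PySem.Dict.empty, 0, 0)).2.2

-- ===== PRECONDITION & SPEC =====
def Spec_lenght_of_longest_subset1 (input_objects : List Int) (k : Int) (out : Int) : Prop := out = lenght_of_longest_subset1_alt input_objects k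
instance (input_objects : List Int) (k : Int) (out : Int) : Decidable (Spec_lenght_of_longest_subset1 input_objects k out) := by unfold Spec_lenght_of_longest_subset1; infer_instance

-- ===== CLAIM (what is proved, stated in full; the proofs are below) =====
def Claim_equal_lenght_of_longest_subset1 : Prop := ∀ (input_objects : List Int) (k : Int), Dom_lenght_of_longest_subset1 input_objects k → Spec_lenght_of_longest_subset1 input_objects k (lenght_of_longest_subset1 input_objects k)

-- ===== LEMMAS AND PROOFS =====

-- count of x in the half-open index window [l, i) of xs
def pvCnt (xs : List Int) (x : Int) (l : Nat) : Nat → Nat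
  | 0 => 0
  | i + 1 => pvCnt xs x l i + (if l ≤ i ∧ xs.getD i 0 = x then 1 else 0)

-- rightmost index of x in the window [l, i) of xs, as A's dict stores it
def pvRm (xs : List Int) (x : Int) (l : Nat) : Nat → Option Int
  | 0 => none
  | i + 1 => if l ≤ i ∧ xs.getD i 0 = x then some (i : Int) else pvRm xs x l i

-- number of distinct values in the window [l, i)
def pvDcnt (xs : List Int) (l i : Nat) : Nat :=
  (PySem.Set.ofList ((xs.take i).drop l)).length

-- characterisation of B's count dict over window [l, i)
def pvCharB (xs : List Int) (l i : Nat) (c : PySem.Dict Int Int) : Prop :=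
  ∀ x, c.get? x = if pvCnt xs x l i = 0 then none else some ((pvCnt xs x l i : Nat) : Int)

-- the coupled invariant after processing the first i elements, window start l
def pvInv (xs : List Int) (k : Int) (i : Nat)
    (sA : Int × PySem.Dict Int Int × Int) (sB : PySem.Dict Int Int × Int × Int)
    (l : Nat) : Prop :=
  sA.2.2 = (l : Int) - 1 ∧ sB.2.1 = (l : Int) ∧ sA.1 = sB.2.2 ∧
  l ≤ i ∧ i ≤ xs.length ∧
  (∀ x, sA.2.1.get? x = pvRm xs x l i) ∧
  pvCharB xs l i sB.1 ∧
  sA.2.1.keys.Nodup ∧ sB.1.keys.Nodup ∧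
  ((sA.2.1.size : Int) ≤ k) ∧
  ((i : Int) - (l : Int) ≤ sA.1)

-- basic window facts ------------------------------------------------------

theorem pvCnt_eq_zero_of_le (xs : List Int) (x : Int) (l i : Nat) (h : i ≤ l) :
    pvCnt xs x l i = 0 := by
  induction i with
  | zero => rfl
  | succ n ih =>
    simp only [pvCnt]
    rw [ih (by omega), if_neg (fun hc => by omega)]

theorem pvCnt_pos_of (xs : List Int) (x : Int) (l i v : Nat)
    (hl : l ≤ v) (hv : v < i) (hx : xs.getD v 0 = x) : 0 < pvCnt xs x l i := by
  induction i with
  | zero => omega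
  | succ n ih =>
    simp only [pvCnt]
    rcases Nat.lt_or_ge v n with h | h
    · have := ih h; omega
    · have hvn : v = n := by omega
      subst hvn
      rw [if_pos ⟨hl, hx⟩]
      omega

theorem pvCnt_eq_zero_iff (xs : List Int) (x : Int) (l i : Nat) :
    pvCnt xs x l i = 0 ↔ ∀ j, l ≤ j → j < i → xs.getD j 0 ≠ x := by
  induction i with
  | zero => simp [pvCnt]
  | succ n ih =>
    simp only [pvCnt]
    by_cases hc : l ≤ n ∧ xs.getD n 0 = x
    · rw [if_pos hc]
      constructor
      · intro h; omega
      · intro h; exact absurd hc.2 (h n hc.1 (by omega))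
    · rw [if_neg hc, Nat.add_zero, ih]
      constructor
      · intro h j hj hjn
        rcases Nat.lt_or_ge j n with hlt | hge
        · exact h j hj hlt
        · have : j = n := by omega
          subst this
          intro hx; exact hc ⟨hj, hx⟩
      · exact fun h j hj hjn => h j hj (by omega)

theorem pvCnt_succ_left (xs : List Int) (x : Int) (l i : Nat) (h : l < i) :
    pvCnt xs x l i = (if xs.getD l 0 = x then 1 else 0) + pvCnt xs x (l + 1) i := by
  induction i with
  | zero => omega
  | succ n ih =>
    simp only [pvCnt]
    rcases Nat.lt_or_ge l n with hlt | hge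
    · rw [ih hlt]
      have e1 : (if l ≤ n ∧ xs.getD n 0 = x then (1 : Nat) else 0)
          = (if l + 1 ≤ n ∧ xs.getD n 0 = x then 1 else 0) := by
        by_cases hP : xs.getD n 0 = x
        · rw [if_pos ⟨by omega, hP⟩, if_pos ⟨by omega, hP⟩]
        · rw [if_neg (fun hc => hP hc.2), if_neg (fun hc => hP hc.2)]
      omega
    · have hln : l = n := by omega
      subst hln
      rw [pvCnt_eq_zero_of_le xs x l l (le_refl l),
        pvCnt_eq_zero_of_le xs x (l + 1) l (by omega)]
      have e2 : (if l + 1 ≤ l ∧ xs.getD l 0 = x then (1 : Nat) else 0) = 0 := by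
        rw [if_neg (fun hc => absurd hc.1 (by omega))]
      have e1 : (if l ≤ l ∧ xs.getD l 0 = x then (1 : Nat) else 0)
          = (if xs.getD l 0 = x then 1 else 0) := by
        by_cases hP : xs.getD l 0 = x
        · rw [if_pos ⟨le_refl l, hP⟩, if_pos hP]
        · rw [if_neg (fun hc => hP hc.2), if_neg hP]
      omega

theorem pvRm_eq_none_iff (xs : List Int) (x : Int) (l i : Nat) :
    pvRm xs x l i = none ↔ pvCnt xs x l i = 0 := by
  induction i with
  | zero => simp [pvRm, pvCnt]
  | succ n ih =>
    simp only [pvRm, pvCnt]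
    by_cases hc : l ≤ n ∧ xs.getD n 0 = x
    · rw [if_pos hc, if_pos hc]
      constructor
      · intro h; exact absurd h (by simp)
      · intro h; omega
    · rw [if_neg hc, if_neg hc, Nat.add_zero]
      exact ih

theorem pvRm_spec (xs : List Int) (x : Int) (l i : Nat) (v : Int)
    (h : pvRm xs x l i = some v) :
    ∃ jn : Nat, v = (jn : Int) ∧ l ≤ jn ∧ jn < i ∧ xs.getD jn 0 = x ∧
      ∀ j', jn < j' → j' < i → xs.getD j' 0 ≠ x := by
  induction i with
  | zero => exact absurd h (by simp [pvRm])
  | succ n ih =>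
    simp only [pvRm] at h
    by_cases hc : l ≤ n ∧ xs.getD n 0 = x
    · rw [if_pos hc] at h
      exact ⟨n, (Option.some.inj h.symm), hc.1, by omega, hc.2,
        fun j' h1 h2 => by omega⟩
    · rw [if_neg hc] at h
      obtain ⟨jn, h1, h2, h3, h4, h5⟩ := ih h
      refine ⟨jn, h1, h2, by omega, h4, fun j' hj1 hj2 => ?_⟩
      rcases Nat.lt_or_ge j' n with hl2 | hl2
      · exact h5 j' hj1 hl2
      · have : j' = n := by omega
        subst this
        intro hx
        exact hc ⟨by omega, hx⟩

theorem pvRm_shrink (xs : List Int) (x : Int) (l l' i : Nat) (v : Int)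
    (h : pvRm xs x l i = some v) (hl' : (l' : Int) ≤ v) :
    pvRm xs x l' i = some v := by
  induction i with
  | zero => exact absurd h (by simp [pvRm])
  | succ n ih =>
    simp only [pvRm] at h ⊢
    by_cases hc : l ≤ n ∧ xs.getD n 0 = x
    · rw [if_pos hc] at h
      have hvn : v = (n : Int) := (Option.some.inj h).symm
      have hln : l' ≤ n := by exact_mod_cast hl'.trans_eq hvn
      rw [if_pos ⟨hln, hc.2⟩]
      exact h
    · rw [if_neg hc] at h
      obtain ⟨jn, h1, h2, h3, h4, h5⟩ := pvRm_spec xs x l n v h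
      have hne : ¬ (l' ≤ n ∧ xs.getD n 0 = x) := by
        rintro ⟨_, hx⟩
        rcases Nat.lt_or_ge jn n with hlt | hge
        · exact h5 n hlt (by omega) hx
        · have : jn = n := by omega
          subst this
          exact hc ⟨h2, hx⟩
      rw [if_neg hne]
      exact ih h

theorem pvRm_none_shrink (xs : List Int) (x : Int) (l l' i : Nat)
    (h : pvRm xs x l i = none) (hl : l ≤ l') : pvRm xs x l' i = none := by
  rw [pvRm_eq_none_iff] at h ⊢
  rw [pvCnt_eq_zero_iff] at h ⊢
  exact fun j hj hji => h j (by omega) hji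

theorem pvMem_window (xs : List Int) (x : Int) (l i : Nat) (hi : i ≤ xs.length) :
    x ∈ (xs.take i).drop l ↔ 0 < pvCnt xs x l i := by
  induction i with
  | zero => simp [pvCnt]
  | succ n ih =>
    have hn : n < xs.length := by omega
    have htake : xs.take (n + 1) = xs.take n ++ [xs.getD n 0] := by
      rw [List.take_add_one]
      simp [List.getElem?_eq_getElem hn]
    rw [htake]
    by_cases hl : l ≤ n
    · rw [List.drop_append_of_le_length (by simp [List.length_take]; omega),
        List.mem_append, List.mem_singleton, ih (by omega)]
      simp only [pvCnt]
      by_cases hx : xs.getD n 0 = x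
      · rw [if_pos ⟨hl, hx⟩]
        exact ⟨fun _ => by omega, fun _ => Or.inr hx.symm⟩
      · rw [if_neg (fun hc => hx hc.2), Nat.add_zero]
        constructor
        · rintro (h | h)
          · exact h
          · exact absurd h.symm hx
        · exact Or.inl
    · have hlen : l ≥ (xs.take n ++ [xs.getD n 0]).length := by
        rw [List.length_append, List.length_take_of_le (by omega)]
        simp; omega
      rw [List.drop_eq_nil_of_le hlen,
        pvCnt_eq_zero_of_le xs x l (n + 1) (by omega)]
      simp

-- dict facts ---------------------------------------------------------------

theorem pvKeys_length (d : PySem.Dict Int Int) : d.keys.length = d.size := by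
  simp [PySem.Dict.keys, PySem.Dict.size]

theorem pvFind?_filter_ne (e x : Int) (l : List (Int × Int)) :
    (l.filter (fun p => !(p.1 == e))).find? (fun p => p.1 == x) =
      if x = e then none else l.find? (fun p => p.1 == x) := by
  induction l with
  | nil => simp
  | cons a t ih =>
    by_cases hae : a.1 = e
    · rw [List.filter_cons_of_neg (by simp [hae]), ih]
      by_cases hxe : x = e
      · rw [if_pos hxe, if_pos hxe]
      · rw [if_neg hxe, if_neg hxe,
          List.find?_cons_of_neg (by simp; omega)]
    · rw [List.filter_cons_of_pos (by simp [hae])]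
      by_cases hax : a.1 = x
      · have hxe : ¬ x = e := fun hc => hae (hax.trans hc)
        rw [List.find?_cons_of_pos (by simp [hax]), if_neg hxe,
          List.find?_cons_of_pos (by simp [hax])]
      · rw [List.find?_cons_of_neg (by simp [hax]), ih,
          List.find?_cons_of_neg (by simp [hax])]

theorem pvGet?_erase (d : PySem.Dict Int Int) (e x : Int) :
    (d.erase e).get? x = if x = e then none else d.get? x := by
  simp only [PySem.Dict.erase, PySem.Dict.get?, pvFind?_filter_ne]
  split <;> rfl

theorem pvNodup_keys_erase (d : PySem.Dict Int Int) (e : Int)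
    (h : d.keys.Nodup) : (d.erase e).keys.Nodup := by
  simp only [PySem.Dict.erase, PySem.Dict.keys] at *
  exact h.sublist (List.filter_sublist.map _)

theorem pvSize_erase_of_mem (d : PySem.Dict Int Int) (e : Int)
    (hnd : d.keys.Nodup) (h : (d.get? e).isSome) :
    (d.erase e).size = d.size - 1 := by
  have hmem : e ∈ d.keys := by
    by_contra hc
    rw [← PySem.Dict.get?_eq_none_iff_not_mem_keys] at hc
    simp [hc] at h
  simp only [PySem.Dict.erase, PySem.Dict.size, PySem.Dict.keys] at *
  rw [← List.countP_eq_length_filter]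
  have hcount : (List.countP (fun p => p.1 == e) d.items) = 1 := by
    have : List.countP (fun p => p.1 == e) d.items
        = List.count e (d.items.map (·.1)) := by
      rw [List.count_eq_countP, List.countP_map]
      rfl
    rw [this]
    exact List.count_eq_one_of_mem hnd hmem
  have hsplit := List.length_eq_countP_add_countP (fun p => p.1 == e) (l := d.items)
  have hcongr : List.countP (fun p => !(p.1 == e)) d.items
      = List.countP (fun p => decide (¬ (p.1 == e) = true)) d.items := by
    apply List.countP_congr
    intro p _
    simp
  omega

theorem pvPyGet?_nat (xs : List Int) (jn : Nat) (h : jn < xs.length) :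
    PySem.List.pyGet? xs (jn : Int) = some (xs.getD jn 0) := by
  simp [PySem.List.pyGet?, PySem.List.pyIdx?, h]

-- size and characterisation glue -------------------------------------------

theorem pvMem_keys_iff (c : PySem.Dict Int Int) (x : Int) :
    x ∈ c.keys ↔ (c.get? x).isSome := by
  rw [← Option.ne_none_iff_isSome, ne_eq,
    PySem.Dict.get?_eq_none_iff_not_mem_keys, not_not]

theorem pvCharB_isSome (xs : List Int) (l i : Nat) (c : PySem.Dict Int Int)
    (h : pvCharB xs l i c) (x : Int) :
    (c.get? x).isSome ↔ 0 < pvCnt xs x l i := by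
  rw [h x]
  by_cases hc : pvCnt xs x l i = 0
  · rw [if_pos hc]; simp [hc]
  · rw [if_neg hc]; simp; omega

theorem pvCharB_getD (xs : List Int) (l i : Nat) (c : PySem.Dict Int Int)
    (h : pvCharB xs l i c) (x : Int) (hpos : 0 < pvCnt xs x l i) :
    c.getD x 0 = (pvCnt xs x l i : Int) := by
  rw [PySem.Dict.getD_eq_get?_getD, h x, if_neg (by omega)]
  rfl

theorem pvSize_eq_dcnt (xs : List Int) (l i : Nat) (hi : i ≤ xs.length)
    (d : PySem.Dict Int Int) (hnd : d.keys.Nodup)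
    (hchar : ∀ x, (d.get? x).isSome ↔ 0 < pvCnt xs x l i) :
    d.size = pvDcnt xs l i := by
  rw [← pvKeys_length, pvDcnt]
  apply List.Perm.length_eq
  rw [List.perm_ext_iff_of_nodup hnd (PySem.Set.nodup_ofList _)]
  intro a
  rw [PySem.Set.mem_ofList, pvMem_window xs a l i hi, pvMem_keys_iff, hchar]

theorem pvSize_le_dcnt (xs : List Int) (l i : Nat) (hi : i ≤ xs.length)
    (d : PySem.Dict Int Int) (hnd : d.keys.Nodup)
    (h : ∀ x ∈ d.keys, 0 < pvCnt xs x l i) :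
    d.size ≤ pvDcnt xs l i := by
  rw [← pvKeys_length, pvDcnt]
  apply List.Subperm.length_le
  apply List.Nodup.subperm hnd
  intro a ha
  rw [PySem.Set.mem_ofList, pvMem_window xs a l i hi]
  exact h a ha

theorem pvGet?_modify (c : PySem.Dict Int Int) (y : Int) (f : Int → Int) (x : Int) :
    (c.modify y 0 f).get? x = if x = y then some (f (c.getD y 0)) else c.get? x := by
  simp only [PySem.Dict.modify]
  rw [PySem.Dict.get?_insert]

-- B's while-loop facts -------------------------------------------------------

theorem pvShrink_of_le (xs : List Int) (k : Int) (fuel : Nat)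
    (st : PySem.Dict Int Int × Int) (h : ¬ ((st.1.size : Int) > k)) :
    pvShrinkB xs k fuel st = st := by
  cases fuel with
  | zero => rfl
  | succ f => simp only [pvShrinkB]; rw [if_neg h]

theorem pvShrink_spec (xs : List Int) (k : Int) (i m l0 : Nat)
    (him : m ≤ i) (hin : i < xs.length)
    (hocc : ∀ jn, l0 ≤ jn → jn < m →
      ∃ vn, m ≤ vn ∧ vn ≤ i ∧ xs.getD vn 0 = xs.getD jn 0)
    (hme : ∀ j', m < j' → j' < i + 1 → xs.getD j' 0 ≠ xs.getD m 0)
    (hsz : ∀ jn, l0 ≤ jn → jn ≤ m → (k : Int) < (pvDcnt xs jn (i + 1) : Int))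
    (hsz2 : ((pvDcnt xs (m + 1) (i + 1) : Int)) ≤ k) :
    ∀ fuel jn c, l0 ≤ jn → jn ≤ m → pvCharB xs jn (i + 1) c → c.keys.Nodup →
      m + 1 - jn ≤ fuel →
      ∃ c', pvShrinkB xs k fuel (c, (jn : Int)) = (c', ((m : Int) + 1)) ∧
        pvCharB xs (m + 1) (i + 1) c' ∧ c'.keys.Nodup := by
  intro fuel
  induction fuel with
  | zero => intro jn c h1 h2 h3 h4 h5; exact absurd h2 (by omega)
  | succ f ih =>
    intro jn c hl0 hjm hchar hnd hfuel
    have hi1 : i + 1 ≤ xs.length := by omega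
    have hsize : c.size = pvDcnt xs jn (i + 1) :=
      pvSize_eq_dcnt xs jn (i + 1) hi1 c hnd (pvCharB_isSome xs jn (i + 1) c hchar)
    have hcond : ((c.size : Int) > k) := by rw [hsize]; exact hsz jn hl0 hjm
    have hjn : jn < xs.length := by omega
    have hposjn : 0 < pvCnt xs (xs.getD jn 0) jn (i + 1) :=
      pvCnt_pos_of xs (xs.getD jn 0) jn (i + 1) jn (le_refl _) (by omega) rfl
    have hgetD : c.getD (xs.getD jn 0) 0 = (pvCnt xs (xs.getD jn 0) jn (i + 1) : Int) :=
      pvCharB_getD xs jn (i + 1) c hchar _ hposjn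
    have hsucc : pvCnt xs (xs.getD jn 0) jn (i + 1)
        = 1 + pvCnt xs (xs.getD jn 0) (jn + 1) (i + 1) := by
      rw [pvCnt_succ_left xs (xs.getD jn 0) jn (i + 1) (by omega), if_pos rfl]
    have hgd1 : (c.modify (xs.getD jn 0) 0 (· - 1)).getD (xs.getD jn 0) 0
        = (pvCnt xs (xs.getD jn 0) (jn + 1) (i + 1) : Int) := by
      rw [PySem.Dict.getD_modify_self, hgetD, hsucc]
      push_cast
      ring
    have hchar1 : ∀ x, (c.modify (xs.getD jn 0) 0 (· - 1)).get? x
        = if x = xs.getD jn 0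
          then some ((pvCnt xs x (jn + 1) (i + 1) : Int))
          else c.get? x := by
      intro x
      rw [pvGet?_modify]
      by_cases hx : x = xs.getD jn 0
      · rw [if_pos hx, if_pos hx, hx, hgetD, hsucc]
        push_cast
        ring_nf
      · rw [if_neg hx, if_neg hx]
    have hcnt_shift : ∀ x, x ≠ xs.getD jn 0 →
        pvCnt xs x (jn + 1) (i + 1) = pvCnt xs x jn (i + 1) := by
      intro x hx
      rw [pvCnt_succ_left xs x jn (i + 1) (by omega),
        if_neg (fun hc => hx hc.symm), Nat.zero_add]
    have hnd1 : (c.modify (xs.getD jn 0) 0 (· - 1)).keys.Nodup := by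
      simp only [PySem.Dict.modify]
      exact PySem.Dict.nodup_keys_insert _ _ _ hnd
    simp only [pvShrinkB]
    rw [if_pos hcond, pvPyGet?_nat xs jn hjn]
    dsimp only
    rcases Nat.lt_or_ge jn m with hlt | hge
    · -- left end not yet at m: the count of xs[jn] stays positive, no erase
      obtain ⟨vn, hv1, hv2, hv3⟩ := hocc jn hl0 hlt
      have hpos1 : 0 < pvCnt xs (xs.getD jn 0) (jn + 1) (i + 1) :=
        pvCnt_pos_of xs (xs.getD jn 0) (jn + 1) (i + 1) vn (by omega) (by omega) hv3
      have hbeq : ((c.modify (xs.getD jn 0) 0 (· - 1)).getD (xs.getD jn 0) 0 == 0)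
          = false := by
        rw [hgd1]
        simp only [beq_eq_false_iff_ne, ne_eq, Nat.cast_eq_zero]
        omega
      rw [hbeq]
      simp only [Bool.false_eq_true, if_false]
      have hchar' : pvCharB xs (jn + 1) (i + 1) (c.modify (xs.getD jn 0) 0 (· - 1)) := by
        intro x
        rw [hchar1 x]
        by_cases hx : x = xs.getD jn 0
        · rw [if_pos hx, hx,
            if_neg (show ¬ pvCnt xs (xs.getD jn 0) (jn + 1) (i + 1) = 0 by omega)]
        · rw [if_neg hx, hchar x, hcnt_shift x hx]
      obtain ⟨c', heq, hc1, hc2⟩ := ih (jn + 1) (c.modify (xs.getD jn 0) 0 (· - 1))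
        (by omega) (by omega) hchar' hnd1 (by omega)
      refine ⟨c', ?_, hc1, hc2⟩
      rw [← heq]
      norm_num
    · -- jn = m: the count of xs[m] drops to zero, the key is erased, loop stops
      have hjm' : jn = m := by omega
      subst hjm'
      have hzero : pvCnt xs (xs.getD jn 0) (jn + 1) (i + 1) = 0 := by
        rw [pvCnt_eq_zero_iff]
        intro j hj hji
        exact hme j (by omega) hji
      have hbeq : ((c.modify (xs.getD jn 0) 0 (· - 1)).getD (xs.getD jn 0) 0 == 0)
          = true := by
        rw [hgd1, hzero]
        simp
      rw [hbeq]
      simp only [if_true]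
      have hchar2 : pvCharB xs (jn + 1) (i + 1)
          ((c.modify (xs.getD jn 0) 0 (· - 1)).erase (xs.getD jn 0)) := by
        intro x
        rw [pvGet?_erase, hchar1 x]
        by_cases hx : x = xs.getD jn 0
        · rw [if_pos hx, hx, if_pos hzero]
        · rw [if_neg hx, if_neg hx, hchar x, hcnt_shift x hx]
      have hnd2 : ((c.modify (xs.getD jn 0) 0 (· - 1)).erase (xs.getD jn 0)).keys.Nodup :=
        pvNodup_keys_erase _ _ hnd1
      have hsize2 : (((c.modify (xs.getD jn 0) 0 (· - 1)).erase (xs.getD jn 0)).size : Int)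
          ≤ k := by
        rw [pvSize_eq_dcnt xs (jn + 1) (i + 1) hi1 _ hnd2
          (pvCharB_isSome xs (jn + 1) (i + 1) _ hchar2)]
        exact hsz2
      refine ⟨(c.modify (xs.getD jn 0) 0 (· - 1)).erase (xs.getD jn 0), ?_, hchar2, hnd2⟩
      rw [pvShrink_of_le xs k f _ (by simpa using hsize2)]

-- one coupled step of the two loops ----------------------------------------

theorem pvStep_inv (xs : List Int) (k : Int) (hk : 1 ≤ k) (i : Nat) (hi : i < xs.length)
    (sA : Int × PySem.Dict Int Int × Int) (sB : PySem.Dict Int Int × Int × Int)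
    (l : Nat) (hinv : pvInv xs k i sA sB l) :
    ∃ l', pvInv xs k (i + 1)
      (pvStepA k sA ((i : Int), xs.getD i 0))
      (pvStepB xs k sB ((i : Int), xs.getD i 0)) l' := by
  obtain ⟨h1, h2, h3, h4, h5, h6, h7, h8, h9, h10, h11⟩ := hinv
  have hi1 : i + 1 ≤ xs.length := by omega
  -- A's dict after the insert
  have charA' : ∀ x, (sA.2.1.insert (xs.getD i 0) (i : Int)).get? x
      = pvRm xs x l (i + 1) := by
    intro x
    rw [PySem.Dict.get?_insert]
    simp only [pvRm]
    by_cases hx : x = xs.getD i 0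
    · rw [if_pos hx, if_pos ⟨h4, hx.symm⟩]
    · rw [if_neg hx, if_neg (fun hc => hx hc.2.symm), h6 x]
  have hndA' : (sA.2.1.insert (xs.getD i 0) (i : Int)).keys.Nodup :=
    PySem.Dict.nodup_keys_insert _ _ _ h8
  have hAsome : ∀ x, ((sA.2.1.insert (xs.getD i 0) (i : Int)).get? x).isSome
      ↔ 0 < pvCnt xs x l (i + 1) := by
    intro x
    rw [charA' x, ← Option.ne_none_iff_isSome, ne_eq, pvRm_eq_none_iff]
    omega
  have hszA' : (sA.2.1.insert (xs.getD i 0) (i : Int)).size = pvDcnt xs l (i + 1) :=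
    pvSize_eq_dcnt xs l (i + 1) hi1 _ hndA' hAsome
  -- B's dict after the count bump
  have hgdB : sB.1.getD (xs.getD i 0) 0 = (pvCnt xs (xs.getD i 0) l i : Int) := by
    rw [PySem.Dict.getD_eq_get?_getD, h7 (xs.getD i 0)]
    by_cases hz : pvCnt xs (xs.getD i 0) l i = 0
    · rw [if_pos hz, hz]; rfl
    · rw [if_neg hz]; rfl
  have hcnty : pvCnt xs (xs.getD i 0) l (i + 1) = pvCnt xs (xs.getD i 0) l i + 1 := by
    simp [pvCnt, h4]
  have charB' : pvCharB xs l (i + 1) (sB.1.modify (xs.getD i 0) 0 (· + 1)) := by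
    intro x
    rw [pvGet?_modify]
    by_cases hx : x = xs.getD i 0
    · have hnz : pvCnt xs (xs.getD i 0) l (i + 1) ≠ 0 := by omega
      rw [if_pos hx, hx, hgdB, if_neg hnz, hcnty]
      push_cast
      rfl
    · have : pvCnt xs x l (i + 1) = pvCnt xs x l i := by
        simp only [pvCnt]
        rw [if_neg (fun hc => hx hc.2.symm), Nat.add_zero]
      rw [if_neg hx, h7 x, this]
  have hndB' : (sB.1.modify (xs.getD i 0) 0 (· + 1)).keys.Nodup := by
    simp only [PySem.Dict.modify]
    exact PySem.Dict.nodup_keys_insert _ _ _ h9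
  have hszB' : (sB.1.modify (xs.getD i 0) 0 (· + 1)).size = pvDcnt xs l (i + 1) :=
    pvSize_eq_dcnt xs l (i + 1) hi1 _ hndB'
      (pvCharB_isSome xs l (i + 1) _ charB')
  by_cases hle : ((sA.2.1.insert (xs.getD i 0) (i : Int)).size : Int) ≤ k
  · -- still at most k distinct: window start stays, both record the window size
    refine ⟨l, ?_⟩
    have hshr : pvShrinkB xs k xs.length
        (sB.1.modify (xs.getD i 0) 0 (· + 1), sB.2.1)
        = (sB.1.modify (xs.getD i 0) 0 (· + 1), sB.2.1) := by
      apply pvShrink_of_le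
      simp only [not_lt]
      rw [hszB']
      rw [hszA'] at hle
      exact hle
    have hstepA : pvStepA k sA ((i : Int), xs.getD i 0)
        = (max sA.1 ((i : Int) - sA.2.2), sA.2.1.insert (xs.getD i 0) (i : Int), sA.2.2) := by
      simp only [pvStepA]
      rw [if_pos hle]
    have hstepB : pvStepB xs k sB ((i : Int), xs.getD i 0)
        = (sB.1.modify (xs.getD i 0) 0 (· + 1), sB.2.1,
            max sB.2.2 ((i : Int) - sB.2.1 + 1)) := by
      simp only [pvStepB]
      rw [hshr]
    rw [hstepA, hstepB]
    refine ⟨h1, h2, ?_, by omega, by omega, charA', charB', hndA', hndB', hle, ?_⟩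
    · rw [h1, h2, h3]
      congr 1
      ring
    · rw [h1]
      have : ((i : Int) + 1) - (l : Int) = (i : Int) - ((l : Int) - 1) := by ring
      push_cast
      rw [this]
      exact le_max_right _ _
  · -- overflow: A deletes the key with minimal rightmost index, B shrinks to there
    rcases hmine : PySem.List.min? (sA.2.1.insert (xs.getD i 0) (i : Int)).keys
        (fun e => (sA.2.1.insert (xs.getD i 0) (i : Int)).getD e 0) with _ | e
    · -- impossible: the dict is nonempty
      exfalso
      rw [PySem.List.min?_eq_none_iff] at hmine
      have : (sA.2.1.insert (xs.getD i 0) (i : Int)).get? (xs.getD i 0) = some (i : Int) :=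
        PySem.Dict.get?_insert_self _ _ _
      have hmem : xs.getD i 0 ∈ (sA.2.1.insert (xs.getD i 0) (i : Int)).keys := by
        rw [pvMem_keys_iff, this]
        rfl
      rw [hmine] at hmem
      exact absurd hmem (List.not_mem_nil)
    -- the minimal key e with its rightmost index v
    have hemem := PySem.List.min?_mem hmine
    have hmin_le := PySem.List.min?_isMin hmine
    have hesome : ((sA.2.1.insert (xs.getD i 0) (i : Int)).get? e).isSome := by
      rw [← pvMem_keys_iff]
      exact hemem
    obtain ⟨v, hv⟩ := Option.isSome_iff_exists.mp hesome
    have hrme : pvRm xs e l (i + 1) = some v := by rw [← charA' e]; exact hv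
    have hgdv : (sA.2.1.insert (xs.getD i 0) (i : Int)).getD e 0 = v := by
      rw [PySem.Dict.getD_eq_get?_getD, hv]
      rfl
    obtain ⟨mn, hveq, hlm, hmlt, hxsm, hlast⟩ := pvRm_spec xs e l (i + 1) v hrme
    have hminv : ∀ x w, pvRm xs x l (i + 1) = some w → v ≤ w := by
      intro x w hw
      have hxsome : ((sA.2.1.insert (xs.getD i 0) (i : Int)).get? x).isSome := by
        rw [charA' x, hw]
        rfl
      have hxmem : x ∈ (sA.2.1.insert (xs.getD i 0) (i : Int)).keys :=
        (pvMem_keys_iff _ x).mpr hxsome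
      have := hmin_le x hxmem
      rw [hgdv] at this
      have hgdx : (sA.2.1.insert (xs.getD i 0) (i : Int)).getD x 0 = w := by
        rw [PySem.Dict.getD_eq_get?_getD, charA' x, hw]
        rfl
      rw [hgdx] at this
      exact this
    -- A's erase gives exactly the window [mn+1, i]
    have charA'' : ∀ x, ((sA.2.1.insert (xs.getD i 0) (i : Int)).erase e).get? x
        = pvRm xs x (mn + 1) (i + 1) := by
      intro x
      rw [pvGet?_erase]
      by_cases hx : x = e
      · rw [if_pos hx, hx]
        symm
        rw [pvRm_eq_none_iff, pvCnt_eq_zero_iff]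
        intro j hj hji
        exact hlast j (by omega) hji
      · rw [if_neg hx, charA' x]
        rcases hrx : pvRm xs x l (i + 1) with _ | w
        · exact (pvRm_none_shrink xs x l (mn + 1) (i + 1) hrx (by omega)).symm
        · obtain ⟨wn, hweq, hlw, hwlt, hxsw, _⟩ := pvRm_spec xs x l (i + 1) w hrx
          have hvw := hminv x w hrx
          have hmn_wn : mn ≤ wn := by omega
          have hne : mn ≠ wn := by
            intro hc
            apply hx
            rw [← hxsw, ← hc, hxsm]
          exact (pvRm_shrink xs x l (mn + 1) (i + 1) w hrx (by omega)).symm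
    have hndA'' : ((sA.2.1.insert (xs.getD i 0) (i : Int)).erase e).keys.Nodup :=
      pvNodup_keys_erase _ _ hndA'
    have hAsome'' : ∀ x, (((sA.2.1.insert (xs.getD i 0) (i : Int)).erase e).get? x).isSome
        ↔ 0 < pvCnt xs x (mn + 1) (i + 1) := by
      intro x
      rw [charA'' x, ← Option.ne_none_iff_isSome, ne_eq, pvRm_eq_none_iff]
      omega
    -- sizes: the inserted dict has exactly k+1 keys, the erased one k
    have hszold : ((sA.2.1.insert (xs.getD i 0) (i : Int)).size : Int) = k + 1 := by
      have hub : (sA.2.1.insert (xs.getD i 0) (i : Int)).size ≤ sA.2.1.size + 1 := by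
        rw [PySem.Dict.size_insert]
        split <;> omega
      omega
    have hszA'' : (((sA.2.1.insert (xs.getD i 0) (i : Int)).erase e).size : Int) = k := by
      rw [pvSize_erase_of_mem _ _ hndA' hesome]
      omega
    have hdcnt1 : ((pvDcnt xs l (i + 1) : Nat) : Int) = k + 1 := by
      rw [← hszA']
      exact hszold
    have hsz2 : ((pvDcnt xs (mn + 1) (i + 1) : Nat) : Int) ≤ k := by
      rw [← pvSize_eq_dcnt xs (mn + 1) (i + 1) hi1 _ hndA'' hAsome'', hszA'']
    -- every key of the inserted dict still occurs in [jn, i] for jn ≤ mn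
    have hkeys_cnt : ∀ jn, jn ≤ mn →
        ∀ x ∈ (sA.2.1.insert (xs.getD i 0) (i : Int)).keys, 0 < pvCnt xs x jn (i + 1) := by
      intro jn hjn x hxmem
      have hxsome := (pvMem_keys_iff _ x).mp hxmem
      obtain ⟨w, hw⟩ := Option.isSome_iff_exists.mp hxsome
      rw [charA' x] at hw
      obtain ⟨wn, hweq, hlw, hwlt, hxsw, _⟩ := pvRm_spec xs x l (i + 1) w hw
      have hvw := hminv x w hw
      exact pvCnt_pos_of xs x jn (i + 1) wn (by omega) (by omega) hxsw
    have hsz : ∀ jn, l ≤ jn → jn ≤ mn → (k : Int) < ((pvDcnt xs jn (i + 1) : Nat) : Int) := by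
      intro jn hj1 hj2
      have := pvSize_le_dcnt xs jn (i + 1) hi1 _ hndA' (hkeys_cnt jn hj2)
      omega
    have hocc : ∀ jn, l ≤ jn → jn < mn →
        ∃ vn, mn ≤ vn ∧ vn ≤ i ∧ xs.getD vn 0 = xs.getD jn 0 := by
      intro jn hj1 hj2
      have hpos : 0 < pvCnt xs (xs.getD jn 0) l (i + 1) :=
        pvCnt_pos_of xs (xs.getD jn 0) l (i + 1) jn hj1 (by omega) rfl
      have hrx : pvRm xs (xs.getD jn 0) l (i + 1) ≠ none := by
        rw [ne_eq, pvRm_eq_none_iff]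
        omega
      obtain ⟨w, hw⟩ := Option.ne_none_iff_exists'.mp hrx
      obtain ⟨wn, hweq, hlw, hwlt, hxsw, _⟩ := pvRm_spec xs (xs.getD jn 0) l (i + 1) w hw
      have hvw := hminv _ w hw
      exact ⟨wn, by omega, by omega, hxsw⟩
    have hme : ∀ j', mn < j' → j' < i + 1 → xs.getD j' 0 ≠ xs.getD mn 0 := by
      intro j' hj1 hj2
      rw [hxsm]
      exact hlast j' hj1 hj2
    -- run B's while-loop
    obtain ⟨c', heq, hchar', hnd'⟩ := pvShrink_spec xs k i mn l (by omega) hi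
      hocc hme hsz hsz2 xs.length l (sB.1.modify (xs.getD i 0) 0 (· + 1))
      (le_refl l) (by omega) charB' hndB' (by omega)
    have hstepA : pvStepA k sA ((i : Int), xs.getD i 0)
        = (sA.1, (sA.2.1.insert (xs.getD i 0) (i : Int)).erase e, v) := by
      simp only [pvStepA]
      rw [if_neg hle, hmine]
      dsimp only
      rw [hgdv]
    have hstepB : pvStepB xs k sB ((i : Int), xs.getD i 0)
        = (c', ((mn : Int) + 1), max sB.2.2 ((i : Int) - ((mn : Int) + 1) + 1)) := by
      simp only [pvStepB]
      rw [h2, heq]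
    have hbest : max sB.2.2 ((i : Int) - ((mn : Int) + 1) + 1) = sB.2.2 := by
      apply max_eq_left
      rw [← h3]
      have hlm' : (l : Int) ≤ (mn : Int) := by exact_mod_cast hlm
      omega
    refine ⟨mn + 1, ?_⟩
    rw [hstepA, hstepB, hbest]
    refine ⟨by push_cast; omega, by push_cast; ring, h3, by omega, by omega,
      charA'', hchar', hndA'', hnd', by rw [hszA''], ?_⟩
    push_cast
    have hlm' : (l : Int) ≤ (mn : Int) := by exact_mod_cast hlm
    omega

-- the two folds agree ------------------------------------------------------

theorem pvFold_eq (xs : List Int) (k : Int) (hk : 1 ≤ k) :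
    ∀ (ys pre : List Int) (sA : Int × PySem.Dict Int Int × Int)
      (sB : PySem.Dict Int Int × Int × Int) (l : Nat),
      xs = pre ++ ys → pvInv xs k pre.length sA sB l →
      ((PySem.List.enumerate ys ((pre.length : Nat) : Int)).foldl (pvStepA k) sA).1
        = ((PySem.List.enumerate ys ((pre.length : Nat) : Int)).foldl
            (pvStepB xs k) sB).2.2 := by
  intro ys
  induction ys with
  | nil =>
    intro pre sA sB l hxs hinv
    rw [PySem.List.enumerate_nil]
    exact hinv.2.2.1
  | cons y t ih =>
    intro pre sA sB l hxs hinv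
    have hilen : pre.length < xs.length := by rw [hxs]; simp
    have hy : xs.getD pre.length 0 = y := by
      rw [hxs]
      simp [List.getD_eq_getElem?_getD]
    obtain ⟨l', hinv'⟩ := pvStep_inv xs k hk pre.length hilen sA sB l hinv
    rw [PySem.List.enumerate_cons, List.foldl_cons, List.foldl_cons, ← hy]
    have hxs' : xs = (pre ++ [y]) ++ t := by rw [hxs]; simp
    have hlen' : (pre ++ [y]).length = pre.length + 1 := by simp
    have := ih (pre ++ [y])
      (pvStepA k sA ((pre.length : Int), xs.getD pre.length 0))
      (pvStepB xs k sB ((pre.length : Int), xs.getD pre.length 0)) l' hxs'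
      (by rw [hlen']; exact hinv')
    rw [hlen'] at this
    push_cast at this ⊢
    exact this

-- for k ≤ 0 A's length accumulator is never touched -------------------------

theorem pvA_zero (k : Int) (hk : k ≤ 0) :
    ∀ (ys : List Int) (s : Int) (d : PySem.Dict Int Int) (il : Int),
      ((PySem.List.enumerate ys s).foldl (pvStepA k) (0, d, il)).1 = 0 := by
  intro ys
  induction ys with
  | nil => intro s d il; rw [PySem.List.enumerate_nil]; rfl
  | cons y t ih =>
    intro s d il
    rw [PySem.List.enumerate_cons, List.foldl_cons]
    have hmem : y ∈ (d.insert y s).keys := by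
      rw [pvMem_keys_iff, PySem.Dict.get?_insert_self]
      rfl
    have hpos : 0 < (d.insert y s).size := by
      rw [← pvKeys_length]
      exact List.length_pos_of_mem hmem
    have hgt : ¬ (((d.insert y s).size : Int) ≤ k) := by omega
    have hstep : ∃ d' il', pvStepA k (0, d, il) (s, y) = (0, d', il') := by
      simp only [pvStepA]
      rw [if_neg hgt]
      rcases PySem.List.min? (d.insert y s).keys (fun e => (d.insert y s).getD e 0)
        with _ | e
      · exact ⟨d.insert y s, il, rfl⟩
      · exact ⟨(d.insert y s).erase e, (d.insert y s).getD e 0, rfl⟩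
    obtain ⟨d', il', hstep⟩ := hstep
    rw [hstep]
    exact ih (s + 1) d' il'

-- ===== VERDICT (by name: the statement is the Claim_ definition above) =====
theorem lenght_of_longest_subset1_spec : Claim_equal_lenght_of_longest_subset1 := by
  intro xs k _
  unfold Spec_lenght_of_longest_subset1
  by_cases hk : k ≤ 0
  · rw [lenght_of_longest_subset1_alt, if_pos hk, lenght_of_longest_subset1]
    exact pvA_zero k hk xs 0 PySem.Dict.empty (-1)
  · rw [lenght_of_longest_subset1_alt, if_neg hk, lenght_of_longest_subset1]
    have hinv0 : pvInv xs k 0 (0, PySem.Dict.empty, -1) (PySem.Dict.empty, 0, 0) 0 := by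
      refine ⟨by norm_num, by norm_num, rfl, le_refl _, by omega,
        fun x => ?_, fun x => ?_, ?_, ?_, ?_, by norm_num⟩
      · rw [PySem.Dict.get?_empty]; rfl
      · rw [PySem.Dict.get?_empty, if_pos (show pvCnt xs x 0 0 = 0 from rfl)]
      · rw [PySem.Dict.keys_empty]; exact List.nodup_nil
      · rw [PySem.Dict.keys_empty]; exact List.nodup_nil
      · simp [PySem.Dict.size_empty]; omega
    have := pvFold_eq xs k (by omega) xs [] (0, PySem.Dict.empty, -1)
      (PySem.Dict.empty, 0, 0) 0 (by simp) hinv0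
    simpa using this
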